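-- pv_equiv track=rewrite | github.com/manette-r/MariageStable | actual_aide_decision/parcoursoup.py | stringIntoList
-- ===== SOURCE A (Python) =====
-- def stringIntoList(str_ecole):
--
--     #on enleve la premiere et derniere parenthese
--     str_ecole = str_ecole[1:len(str_ecole)-1]
--     liste_choix_tt = []
--     list_choix = []
--
--     for carac in str_ecole:
--         if (carac == ")") :
--             liste_choix_tt.append(list_choix)
--             list_choix = []
--         elif (carac.isnumeric()) :
--             list_choix.append(int(carac))
--
--     return liste_choix_tt
-- ===== SOURCE B (Python) =====
-- # B: split-then-map instead of A's running-accumulator state machine (objective: simpler).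
-- def stringIntoList(str_ecole):
--     inner = str_ecole[1:len(str_ecole)-1]
--     return [[int(c) for c in seg if c.isnumeric()]
--             for seg in inner.split(")")[:-1]]
-- ===== Notes on version B (the rewrite author's own statement) =====
-- stated objective: simpler
-- what changed: Replaced A's character-by-character state machine (running current-group and all-groups accumulators, flushed on each closing parenthesis) with a split-then-map: split the inner string at closing parentheses, drop the unterminated last segment, and map each segment to its digit values.
import Mathlib
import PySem

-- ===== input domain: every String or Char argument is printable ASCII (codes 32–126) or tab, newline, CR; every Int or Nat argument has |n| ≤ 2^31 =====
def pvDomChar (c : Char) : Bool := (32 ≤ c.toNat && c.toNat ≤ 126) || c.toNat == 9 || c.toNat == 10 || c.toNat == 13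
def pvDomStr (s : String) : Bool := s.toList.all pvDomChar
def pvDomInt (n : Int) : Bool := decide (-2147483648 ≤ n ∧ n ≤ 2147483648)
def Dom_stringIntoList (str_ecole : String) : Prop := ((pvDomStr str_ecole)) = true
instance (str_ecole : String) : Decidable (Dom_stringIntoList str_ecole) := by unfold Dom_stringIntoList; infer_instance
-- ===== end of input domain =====

-- B replaces A's running-accumulator state machine with split-on-')'-then-map (objective: simpler).


-- ===== PORT A =====
-- carac.isnumeric() ported as PySem.Chars.isdigit (exact on the ASCII domain: the only
-- numeric ASCII chars are '0'-'9'); int(carac) of such a digit char is c.toNat - 48 (exact).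
def stringIntoList (str_ecole : String) : List (List Int) :=
  -- str_ecole = str_ecole[1:len(str_ecole)-1]
  let s := PySem.List.slice str_ecole.toList (some 1) (some (PySem.Str.len str_ecole - 1))
  -- for carac in str_ecole: …  (state = (liste_choix_tt, list_choix))
  (s.foldl
    (fun (st : List (List Int) × List Int) c =>
      if c = ')' then (st.1 ++ [st.2], [])
      else if PySem.Chars.isdigit c then (st.1, st.2 ++ [(c.toNat : Int) - 48])
      else st)
    ([], [])).1

-- ===== PORT B =====
-- inner.split(")")[:-1], each segment mapped to its digit values (same ASCII-exact
-- isnumeric/int(c) porting note as in port A).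
def stringIntoList_alt (str_ecole : String) : List (List Int) :=
  let inner := PySem.List.slice str_ecole.toList (some 1) (some (PySem.Str.len str_ecole - 1))
  ((PySem.Chars.splitOn inner [')']).dropLast).map
    (fun seg => (seg.filter PySem.Chars.isdigit).map (fun c => (c.toNat : Int) - 48))

-- ===== PRECONDITION & SPEC =====
def Spec_stringIntoList (str_ecole : String) (out : List (List Int)) : Prop := out = stringIntoList_alt str_ecole
instance (str_ecole : String) (out : List (List Int)) : Decidable (Spec_stringIntoList str_ecole out) := by unfold Spec_stringIntoList; infer_instance

-- ===== CLAIM (what is proved, stated in full; the proofs are below) =====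
def Claim_equal_stringIntoList : Prop := ∀ (str_ecole : String), Dom_stringIntoList str_ecole → Spec_stringIntoList str_ecole (stringIntoList str_ecole)

-- ===== LEMMAS AND PROOFS =====

-- Proof-side recursive characterisation of splitting on ')'.
def sp : List Char → List (List Char)
  | [] => [[]]
  | c :: t => if c = ')' then [] :: sp t else (sp t).modifyHead (c :: ·)

lemma mh_id {α : Type} (l : List α) : List.modifyHead (fun h => h) l = l := by
  cases l <;> simp

lemma sp_ne_nil (cs : List Char) : sp cs ≠ [] := by
  cases cs with
  | nil => simp [sp]
  | cons c t =>
    simp only [sp]; split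
    · simp
    · cases h : sp t with
      | nil => exact absurd h (sp_ne_nil t)
      | cons a b => simp

lemma go_spec (cs : List Char) : ∀ (fuel : Nat) (cur : List Char) (acc : List (List Char)),
    cs.length ≤ fuel →
    PySem.Chars.splitOn.go [')'] fuel cs cur acc
      = acc.reverse ++ (sp cs).modifyHead (fun h => cur.reverse ++ h) := by
  induction cs with
  | nil => intro fuel cur acc h
           cases fuel <;> simp [PySem.Chars.splitOn.go, sp]
  | cons c t ih =>
    intro fuel cur acc h
    cases fuel with
    | zero => simp at h
    | succ n =>
      by_cases hc : c = ')'
      · subst hc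
        rw [show PySem.Chars.splitOn.go [')'] (n+1) (')' :: t) cur acc
              = PySem.Chars.splitOn.go [')'] n t [] (cur.reverse :: acc) from by
            simp [PySem.Chars.splitOn.go, List.isPrefixOf]]
        rw [ih n [] (cur.reverse :: acc) (by simpa using h)]
        simp [sp, mh_id]
      · rw [show PySem.Chars.splitOn.go [')'] (n+1) (c :: t) cur acc
              = PySem.Chars.splitOn.go [')'] n t (c :: cur) acc from by
            simp [PySem.Chars.splitOn.go, List.isPrefixOf, Ne.symm hc]]
        rw [ih n (c :: cur) acc (by simpa using h)]
        simp only [sp, if_neg hc]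
        obtain ⟨s0, ss, hs⟩ : ∃ s0 ss, sp t = s0 :: ss := by
          cases hsp : sp t with
          | nil => exact absurd hsp (sp_ne_nil t)
          | cons a b => exact ⟨a, b, rfl⟩
        simp [hs, List.modifyHead]

lemma splitOn_eq_sp (cs : List Char) : PySem.Chars.splitOn cs [')'] = sp cs := by
  rw [PySem.Chars.splitOn, go_spec cs (cs.length + 1) [] [] (by omega)]
  simp [mh_id]

-- A's fold, in terms of sp: the finished groups are the non-final segments,
-- the first of them prefixed by the ints already accumulated in list_choix.
lemma foldA (cs : List Char) : ∀ (tt : List (List Int)) (cur : List Int),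
    (cs.foldl
      (fun (st : List (List Int) × List Int) c =>
        if c = ')' then (st.1 ++ [st.2], [])
        else if PySem.Chars.isdigit c then (st.1, st.2 ++ [(c.toNat : Int) - 48])
        else st)
      (tt, cur)).1
    = tt ++ (((sp cs).dropLast).map
        (fun seg => (seg.filter PySem.Chars.isdigit).map (fun c => (c.toNat : Int) - 48))).modifyHead
        (fun h => cur ++ h) := by
  induction cs with
  | nil => intro tt cur; simp [sp]
  | cons c t ih =>
    intro tt cur
    obtain ⟨s0, ss, hs⟩ : ∃ s0 ss, sp t = s0 :: ss := by
      cases hsp : sp t with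
      | nil => exact absurd hsp (sp_ne_nil t)
      | cons a b => exact ⟨a, b, rfl⟩
    by_cases hc : c = ')'
    · subst hc
      simp only [List.foldl_cons, if_true]
      rw [ih (tt ++ [cur]) []]
      simp [sp, hs]
    · by_cases hd : PySem.Chars.isdigit c
      · simp only [List.foldl_cons, if_neg hc, if_pos hd]
        rw [ih tt (cur ++ [(c.toNat : Int) - 48])]
        simp only [sp, if_neg hc, hs, List.modifyHead]
        cases ss with
        | nil => simp
        | cons a b => simp [hd]
      · simp only [List.foldl_cons, if_neg hc, if_neg hd]
        rw [ih tt cur]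
        simp only [sp, if_neg hc, hs, List.modifyHead]
        cases ss with
        | nil => simp
        | cons a b => simp [hd]

-- ===== VERDICT (by name: the statement is the Claim_ definition above) =====
theorem stringIntoList_spec : Claim_equal_stringIntoList := by
  intro s _
  unfold Spec_stringIntoList stringIntoList stringIntoList_alt
  simp only [foldA, splitOn_eq_sp, mh_id, List.nil_append]
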